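-- pv_equiv track=rewrite | github.com/alexaserr/sanando-desde-el-corazon | clinical-api/app/routers/pdf.py | _section_ancestors
-- ===== SOURCE A (Python) =====
-- def _esc(val: str | None) -> str:
--     if val is None:
--         return ""
--     return (
--         val.replace("&", "&amp;")
--         .replace("<", "&lt;")
--         .replace(">", "&gt;")
--         .replace('"', "&quot;")
--     )
--
-- def _section_ancestors(ancestors: list[dict[str, str]], conciliation: dict[str, str] | None) -> str:
--     if not ancestors and not conciliation:
--         return ""
--     parts = ["<h2>Ancestros sistémicos</h2>"]
--     for a in ancestors:
--         parts.append('<div class="topic-card">')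
--         title = a.get("member") or "—"
--         lineage = a.get("lineage") or ""
--         parts.append(f'<h3>{_esc(title)}{f" — {_esc(lineage)}" if lineage else ""}</h3>')
--
--         rows = []
--         if a.get("bond"):
--             rows.append(f'<tr><td class="k">Energía vincular</td><td>{_esc(a["bond"])}</td></tr>')
--         if a.get("ancestor_roles"):
--             rows.append(f'<tr><td class="k">Roles ancestro</td><td>{_esc(a["ancestor_roles"])}</td></tr>')
--         if a.get("consultant_roles"):
--             rows.append(f'<tr><td class="k">Roles consultante</td><td>{_esc(a["consultant_roles"])}</td></tr>')
--         if a.get("expressions"):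
--             rows.append(f'<tr><td class="k">Expresiones de la energía</td><td>{_esc(a["expressions"])}</td></tr>')
--         if a.get("traumas"):
--             rows.append(f'<tr><td class="k">Traumas familiares</td><td>{_esc(a["traumas"])}</td></tr>')
--         if rows:
--             parts.append(f'<table class="meta-table">{"".join(rows)}</table>')
--         parts.append("</div>")
--
--     if conciliation:
--         parts.append("<h3>Conciliación</h3>")
--         rows = []
--         if conciliation.get("healing"):
--             rows.append(f'<tr><td class="k">Frases de sanación</td><td>{conciliation["healing"]}</td></tr>')
--         if conciliation.get("acts"):
--             rows.append(f'<tr><td class="k">Actos de conciliación</td><td>{conciliation["acts"]}</td></tr>')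
--         if conciliation.get("life"):
--             rows.append(f'<tr><td class="k">Áreas de vida afectadas</td><td>{conciliation["life"]}</td></tr>')
--         if conciliation.get("relationship"):
--             rows.append(f'<tr><td class="k">Relación de sesión</td><td>{conciliation["relationship"]}</td></tr>')
--         if rows:
--             parts.append(f'<table class="meta-table">{"".join(rows)}</table>')
--     return "".join(parts)
-- ===== SOURCE B (Python) =====
-- _ANC_SPEC = {
--     "bond": (0, "Energía vincular"),
--     "ancestor_roles": (1, "Roles ancestro"),
--     "consultant_roles": (2, "Roles consultante"),
--     "expressions": (3, "Expresiones de la energía"),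
--     "traumas": (4, "Traumas familiares"),
-- }
-- _CON_SPEC = {
--     "healing": (0, "Frases de sanación"),
--     "acts": (1, "Actos de conciliación"),
--     "life": (2, "Áreas de vida afectadas"),
--     "relationship": (3, "Relación de sesión"),
-- }
--
--
-- def _esc(val: str | None) -> str:
--     if val is None:
--         return ""
--     return (
--         val.replace("&", "&amp;")
--         .replace("<", "&lt;")
--         .replace(">", "&gt;")
--         .replace('"', "&quot;")
--     )
--
--
-- def _table(data, spec, esc):
--     # one pass over the dict's items, then sort hits by the spec rank
--     hits = sorted(
--         [(spec[k][0], spec[k][1], v) for k, v in data.items() if v and k in spec],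
--         key=lambda t: t[0],
--     )
--     rows = "".join(
--         f'<tr><td class="k">{lbl}</td><td>{esc(v)}</td></tr>' for _, lbl, v in hits
--     )
--     return f'<table class="meta-table">{rows}</table>' if rows else ""
--
--
-- def _section_ancestors(ancestors: list[dict[str, str]], conciliation: dict[str, str] | None) -> str:
--     if not ancestors and not conciliation:
--         return ""
--     out = "<h2>Ancestros sistémicos</h2>"
--     for a in ancestors:
--         head = _esc(a.get("member") or "—")
--         lin = a.get("lineage") or ""
--         if lin:
--             head += f" — {_esc(lin)}"
--         out += f'<div class="topic-card"><h3>{head}</h3>{_table(a, _ANC_SPEC, _esc)}</div>'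
--     if conciliation:
--         out += "<h3>Conciliación</h3>" + _table(conciliation, _CON_SPEC, lambda v: v)
--     return out
-- ===== Notes on version B (the rewrite author's own statement) =====
-- stated objective: alternative
-- what changed: Instead of A's hardcoded per-field if/get chains and mutable parts list, B makes one pass over each dict's items, keeps the fields found in a rank/label spec dict, sorts the hits by rank to restore A's field order, and concatenates strings directly.
import Mathlib
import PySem

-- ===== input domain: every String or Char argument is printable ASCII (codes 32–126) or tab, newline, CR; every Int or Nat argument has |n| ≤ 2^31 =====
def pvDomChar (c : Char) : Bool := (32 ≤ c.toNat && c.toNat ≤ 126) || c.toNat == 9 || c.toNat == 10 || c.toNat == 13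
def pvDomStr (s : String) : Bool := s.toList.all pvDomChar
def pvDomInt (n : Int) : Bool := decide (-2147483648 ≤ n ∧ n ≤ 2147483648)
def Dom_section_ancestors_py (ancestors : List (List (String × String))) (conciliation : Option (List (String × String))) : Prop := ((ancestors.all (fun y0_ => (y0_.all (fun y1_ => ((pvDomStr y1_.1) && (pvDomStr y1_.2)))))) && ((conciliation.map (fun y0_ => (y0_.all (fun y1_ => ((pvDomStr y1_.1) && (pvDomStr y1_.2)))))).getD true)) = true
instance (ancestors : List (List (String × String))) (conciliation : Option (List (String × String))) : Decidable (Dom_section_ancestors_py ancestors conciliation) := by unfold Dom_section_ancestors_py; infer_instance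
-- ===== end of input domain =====

-- B replaces A's per-field lookup chains by a single pass over the dict's items that keeps
-- the fields found in a rank/label spec dict, sorts the hits by rank, and concatenates
-- strings directly instead of appending to a parts list (alternative; same cost).


-- ===== PORT A =====
-- shared low-level helpers (both Pythons use _esc, dict.get and the `or` default)

-- _esc on a present string (the None branch is unreachable here: every value passed is a str)
def escPy (val : String) : String :=
  PySem.Str.replace (PySem.Str.replace (PySem.Str.replace
    (PySem.Str.replace val "&" "&amp;") "<" "&lt;") ">" "&gt;") "\"" "&quot;"

-- `d.get(k) or default` (Python string truthiness: empty string is falsy)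
def orDefault (o : Option String) (d : String) : String :=
  match o with
  | some s => if s ≠ "" then s else d
  | none => d

-- `if d.get(k):` — key present with a non-empty value
def truthyGet (d : List (String × String)) (k : String) : Bool :=
  match (PySem.Dict.mk d).get? k with
  | some v => v ≠ ""
  | none => false

-- d[k]; in both programs it is only evaluated under `if d.get(k):`, where it cannot raise,
-- so the KeyError default "" is exact on every reached call
def getItem (d : List (String × String)) (k : String) : String :=
  ((PySem.Dict.mk d).get? k).getD ""

-- `not conciliation` (None or empty dict is falsy)
def pyNotOpt (conciliation : Option (List (String × String))) : Bool :=
  match conciliation with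
  | none => true
  | some c => c.isEmpty

-- the five `if a.get(...): rows.append(...)` statements of A's ancestor loop
def rowsAncA (a : List (String × String)) : List String :=
  let rows : List String := []
  let rows := if truthyGet a "bond" then rows ++ ["<tr><td class=\"k\">Energía vincular</td><td>" ++ escPy (getItem a "bond") ++ "</td></tr>"] else rows
  let rows := if truthyGet a "ancestor_roles" then rows ++ ["<tr><td class=\"k\">Roles ancestro</td><td>" ++ escPy (getItem a "ancestor_roles") ++ "</td></tr>"] else rows
  let rows := if truthyGet a "consultant_roles" then rows ++ ["<tr><td class=\"k\">Roles consultante</td><td>" ++ escPy (getItem a "consultant_roles") ++ "</td></tr>"] else rows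
  let rows := if truthyGet a "expressions" then rows ++ ["<tr><td class=\"k\">Expresiones de la energía</td><td>" ++ escPy (getItem a "expressions") ++ "</td></tr>"] else rows
  let rows := if truthyGet a "traumas" then rows ++ ["<tr><td class=\"k\">Traumas familiares</td><td>" ++ escPy (getItem a "traumas") ++ "</td></tr>"] else rows
  rows

-- the four `if conciliation.get(...): rows.append(...)` statements (values NOT escaped, as in A)
def rowsConA (c : List (String × String)) : List String :=
  let rows : List String := []
  let rows := if truthyGet c "healing" then rows ++ ["<tr><td class=\"k\">Frases de sanación</td><td>" ++ getItem c "healing" ++ "</td></tr>"] else rows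
  let rows := if truthyGet c "acts" then rows ++ ["<tr><td class=\"k\">Actos de conciliación</td><td>" ++ getItem c "acts" ++ "</td></tr>"] else rows
  let rows := if truthyGet c "life" then rows ++ ["<tr><td class=\"k\">Áreas de vida afectadas</td><td>" ++ getItem c "life" ++ "</td></tr>"] else rows
  let rows := if truthyGet c "relationship" then rows ++ ["<tr><td class=\"k\">Relación de sesión</td><td>" ++ getItem c "relationship" ++ "</td></tr>"] else rows
  rows

-- the body of A's `for a in ancestors:` loop
def ancBodyA (parts : List String) (a : List (String × String)) : List String :=
  let parts := parts ++ ["<div class=\"topic-card\">"]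
  let title := orDefault ((PySem.Dict.mk a).get? "member") "—"
  let lineage := orDefault ((PySem.Dict.mk a).get? "lineage") ""
  let parts := parts ++ ["<h3>" ++ escPy title ++ (if lineage ≠ "" then " — " ++ escPy lineage else "") ++ "</h3>"]
  let rows := rowsAncA a
  let parts := if rows ≠ [] then parts ++ ["<table class=\"meta-table\">" ++ PySem.Str.join "" rows ++ "</table>"] else parts
  parts ++ ["</div>"]

-- the body of A's `if conciliation:` block
def conBodyA (parts : List String) (c : List (String × String)) : List String :=
  let parts := parts ++ ["<h3>Conciliación</h3>"]
  let rows := rowsConA c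
  if rows ≠ [] then parts ++ ["<table class=\"meta-table\">" ++ PySem.Str.join "" rows ++ "</table>"] else parts

def section_ancestors_py (ancestors : List (List (String × String))) (conciliation : Option (List (String × String))) : String :=
  if ancestors.isEmpty && pyNotOpt conciliation then ""
  else
    let parts : List String := ["<h2>Ancestros sistémicos</h2>"]
    let parts := ancestors.foldl ancBodyA parts
    let parts :=
      match conciliation with
      | some c => if c.isEmpty then parts else conBodyA parts c
      | none => parts
    PySem.Str.join "" parts

-- ===== PORT B =====
-- _ANC_SPEC / _CON_SPEC: key -> (rank, label)
def ancSpec : PySem.Dict String (Int × String) :=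
  PySem.Dict.mk
    [("bond", (0, "Energía vincular")),
     ("ancestor_roles", (1, "Roles ancestro")),
     ("consultant_roles", (2, "Roles consultante")),
     ("expressions", (3, "Expresiones de la energía")),
     ("traumas", (4, "Traumas familiares"))]

def conSpec : PySem.Dict String (Int × String) :=
  PySem.Dict.mk
    [("healing", (0, "Frases de sanación")),
     ("acts", (1, "Actos de conciliación")),
     ("life", (2, "Áreas de vida afectadas")),
     ("relationship", (3, "Relación de sesión"))]

-- `data.items()`: under the assoc-list dict convention (lookup = first match) the items of
-- the dict are the pairs with the first occurrence of each key (exact: a real Python dict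
-- has unique keys, where this is the identity)
def dedupKeys : List (String × String) → List (String × String)
  | [] => []
  | (k, v) :: rest => (k, v) :: dedupKeys (rest.filter (fun p => p.1 ≠ k))
termination_by l => l.length
decreasing_by simp; exact le_trans (List.length_filter_le _ _) (by simp)

-- the comprehension body: `(spec[k][0], spec[k][1], v) ... if v and k in spec`
def hitOf (spec : PySem.Dict String (Int × String)) (kv : String × String) : Option (Int × String × String) :=
  if kv.2 ≠ "" then (spec.get? kv.1).map (fun rl => (rl.1, rl.2, kv.2)) else none

-- one generated <tr> row (esc = _esc for ancestors, identity for conciliation)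
def rowStr (esc : String → String) (t : Int × String × String) : String :=
  "<tr><td class=\"k\">" ++ t.2.1 ++ "</td><td>" ++ esc t.2.2 ++ "</td></tr>"

-- _table: one pass over the items, sort hits by rank, join, wrap unless empty
def tableB (data : List (String × String)) (spec : PySem.Dict String (Int × String)) (esc : String → String) : String :=
  let hits := PySem.List.sorted ((dedupKeys data).filterMap (hitOf spec)) (fun t => t.1) false
  let rows := PySem.Str.join "" (hits.map (rowStr esc))
  if rows ≠ "" then "<table class=\"meta-table\">" ++ rows ++ "</table>" else ""

-- one ancestor card of B's loop body
def cardB (a : List (String × String)) : String :=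
  let head := escPy (orDefault ((PySem.Dict.mk a).get? "member") "—")
  let lin := orDefault ((PySem.Dict.mk a).get? "lineage") ""
  let head := if lin ≠ "" then head ++ " — " ++ escPy lin else head
  "<div class=\"topic-card\"><h3>" ++ head ++ "</h3>" ++ tableB a ancSpec escPy ++ "</div>"

def section_ancestors_py_alt (ancestors : List (List (String × String))) (conciliation : Option (List (String × String))) : String :=
  if ancestors.isEmpty && pyNotOpt conciliation then ""
  else
    let out := ancestors.foldl (fun out a => out ++ cardB a) "<h2>Ancestros sistémicos</h2>"
    match conciliation with
    | some c => if c.isEmpty then out else out ++ "<h3>Conciliación</h3>" ++ tableB c conSpec (fun v => v)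
    | none => out

-- ===== PRECONDITION & SPEC =====
def Spec_section_ancestors_py (ancestors : List (List (String × String))) (conciliation : Option (List (String × String))) (out : String) : Prop := out = section_ancestors_py_alt ancestors conciliation
instance (ancestors : List (List (String × String))) (conciliation : Option (List (String × String))) (out : String) : Decidable (Spec_section_ancestors_py ancestors conciliation out) := by unfold Spec_section_ancestors_py; infer_instance

-- ===== CLAIM (what is proved, stated in full; the proofs are below) =====
def Claim_equal_section_ancestors_py : Prop := ∀ (ancestors : List (List (String × String))) (conciliation : Option (List (String × String))), Dom_section_ancestors_py ancestors conciliation → Spec_section_ancestors_py ancestors conciliation (section_ancestors_py ancestors conciliation)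

-- ===== LEMMAS AND PROOFS =====

def ancKeys : List String := ["bond", "ancestor_roles", "consultant_roles", "expressions", "traumas"]
def conKeys : List String := ["healing", "acts", "life", "relationship"]

-- A's row chain, as the (rank, label, value) triples B sorts into the same order
def chainAnc (a : List (String × String)) : List (Int × String × String) :=
  (if truthyGet a "bond" then [((0 : Int), "Energía vincular", getItem a "bond")] else []) ++
  (if truthyGet a "ancestor_roles" then [((1 : Int), "Roles ancestro", getItem a "ancestor_roles")] else []) ++
  (if truthyGet a "consultant_roles" then [((2 : Int), "Roles consultante", getItem a "consultant_roles")] else []) ++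
  (if truthyGet a "expressions" then [((3 : Int), "Expresiones de la energía", getItem a "expressions")] else []) ++
  (if truthyGet a "traumas" then [((4 : Int), "Traumas familiares", getItem a "traumas")] else [])

def chainCon (c : List (String × String)) : List (Int × String × String) :=
  (if truthyGet c "healing" then [((0 : Int), "Frases de sanación", getItem c "healing")] else []) ++
  (if truthyGet c "acts" then [((1 : Int), "Actos de conciliación", getItem c "acts")] else []) ++
  (if truthyGet c "life" then [((2 : Int), "Áreas de vida afectadas", getItem c "life")] else []) ++
  (if truthyGet c "relationship" then [((3 : Int), "Relación de sesión", getItem c "relationship")] else [])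

-- the argument shape `dedupKeys.induct` produces for the recursive call
theorem attach_filter_ne (rest : List (String × String)) (k : String) :
    (List.filter (fun x : {x // x ∈ rest} => decide (x.val.1 ≠ k)) rest.attach).unattach
      = rest.filter (fun p => p.1 ≠ k) := by
  rw [List.unattach_filter (g := fun p => decide (p.1 ≠ k)) (hf := fun x h => rfl), List.unattach_attach]

theorem mem_dedupKeys (a : List (String × String)) : ∀ kv ∈ dedupKeys a, kv ∈ a := by
  induction a using dedupKeys.induct with
  | case1 => intro kv h; simp [dedupKeys] at h
  | case2 k v rest ih =>
    intro kv h
    rw [attach_filter_ne] at ih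
    rw [dedupKeys] at h
    rcases List.mem_cons.mp h with h | h
    · exact h ▸ List.mem_cons_self
    · exact List.mem_cons_of_mem _ (List.mem_of_mem_filter (ih kv h))

theorem get?_mk_filter_ne (rest : List (String × String)) (k0 k : String) (h : k ≠ k0) :
    (PySem.Dict.mk (rest.filter (fun p => p.1 ≠ k0))).get? k = (PySem.Dict.mk rest).get? k := by
  induction rest with
  | nil => rfl
  | cons p rest ih =>
    obtain ⟨pk, pv⟩ := p
    simp only [ne_eq, decide_not] at ih ⊢
    have hne : ¬ (k0 = k) := fun he => h he.symm
    by_cases hp : pk = k0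
    · simp [List.filter_cons, hp, PySem.Dict.get?_mk_cons, ih, hne]
    · by_cases hk : pk = k
      · simp [List.filter_cons, hp, PySem.Dict.get?_mk_cons, hk, hne, h]
      · simp [List.filter_cons, hp, PySem.Dict.get?_mk_cons, hk, ih]

theorem filter_dedupKeys (a : List (String × String)) (k : String) :
    (dedupKeys a).filter (fun kv => kv.1 = k)
      = (match (PySem.Dict.mk a).get? k with
         | some v => [(k, v)]
         | none => []) := by
  induction a using dedupKeys.induct with
  | case1 => simp [dedupKeys, PySem.Dict.get?, PySem.Dict.empty]
  | case2 k0 v0 rest ih =>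
    rw [attach_filter_ne] at ih
    rw [dedupKeys]
    by_cases hk : k0 = k
    · subst hk
      have htail : (dedupKeys (rest.filter (fun p => p.1 ≠ k0))).filter (fun kv => kv.1 = k0) = [] := by
        apply List.filter_eq_nil_iff.mpr
        intro kv hkv
        have hm := List.mem_filter.mp (mem_dedupKeys _ kv hkv)
        simpa using hm.2
      simp only [ne_eq, decide_not] at htail
      simp [List.filter_cons, htail, PySem.Dict.get?_mk_cons]
    · have hbe : (k0 == k) = false := by simpa using hk
      simp only [List.filter_cons]
      rw [ih, get?_mk_filter_ne rest k0 k (fun he => hk he.symm)]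
      simp [PySem.Dict.get?_mk_cons, hbe, hk]

theorem bucket_eq (spec : PySem.Dict String (Int × String)) (a : List (String × String))
    (k : String) (r : Int) (l : String) (hs : spec.get? k = some (r, l)) :
    ((dedupKeys a).filter (fun kv => kv.1 = k)).filterMap (hitOf spec)
      = if truthyGet a k then [(r, l, getItem a k)] else [] := by
  rw [filter_dedupKeys]
  cases hg : (PySem.Dict.mk a).get? k with
  | none => simp [truthyGet, hg]
  | some v =>
    by_cases hv : v = "" <;>
      simp [truthyGet, getItem, hg, hv, hitOf, hs]

-- splitting a filterMap into per-key buckets (each surviving pair has its key in ks)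
theorem filterMap_perm_buckets {β : Type} (ks : List String) (hnd : ks.Nodup)
    (F : String × String → Option β) (lst : List (String × String))
    (h : ∀ kv ∈ lst, F kv ≠ none → kv.1 ∈ ks) :
    (lst.filterMap F).Perm
      ((ks.map (fun k => (lst.filter (fun kv => kv.1 = k)).filterMap F)).flatten) := by
  induction lst with
  | nil => simp
  | cons kv rest ih =>
    have hrest : ∀ p ∈ rest, F p ≠ none → p.1 ∈ ks := fun p hp => h p (List.mem_cons_of_mem _ hp)
    have ih := ih hrest
    cases hF : F kv with
    | none =>
      have hmap : ∀ k ∈ ks,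
          ((kv :: rest).filter (fun p => p.1 = k)).filterMap F
            = (rest.filter (fun p => p.1 = k)).filterMap F := by
        intro k _
        by_cases hk : kv.1 = k <;> simp [List.filter_cons, hk, hF]
      rw [List.map_congr_left hmap]
      simpa [List.filterMap_cons, hF] using ih
    | some y =>
      have hkmem : kv.1 ∈ ks := h kv List.mem_cons_self (by simp [hF])
      obtain ⟨s, t, rfl⟩ := List.append_of_mem hkmem
      have hknot : kv.1 ∉ s ∧ kv.1 ∉ t := by
        have h3 := (List.pairwise_cons.mp (List.nodup_middle.mp hnd)).1
        exact ⟨fun hx => h3 kv.1 (List.mem_append.mpr (Or.inl hx)) rfl,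
               fun hx => h3 kv.1 (List.mem_append.mpr (Or.inr hx)) rfl⟩
      have hbs : ∀ k ∈ s, ((kv :: rest).filter (fun p => p.1 = k)).filterMap F
          = (rest.filter (fun p => p.1 = k)).filterMap F := by
        intro k hk
        have : kv.1 ≠ k := fun he => hknot.1 (he ▸ hk)
        simp [List.filter_cons, this]
      have hbt : ∀ k ∈ t, ((kv :: rest).filter (fun p => p.1 = k)).filterMap F
          = (rest.filter (fun p => p.1 = k)).filterMap F := by
        intro k hk
        have : kv.1 ≠ k := fun he => hknot.2 (he ▸ hk)
        simp [List.filter_cons, this]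
      have hbk : ((kv :: rest).filter (fun p => p.1 = kv.1)).filterMap F
          = y :: (rest.filter (fun p => p.1 = kv.1)).filterMap F := by
        simp [List.filter_cons, List.filterMap_cons, hF]
      rw [List.map_append, List.map_cons, List.flatten_append, List.flatten_cons,
        List.map_congr_left hbs, List.map_congr_left hbt, hbk]
      rw [List.map_append, List.map_cons, List.flatten_append, List.flatten_cons] at ih
      simp only [List.filterMap_cons, hF]
      refine (ih.cons y).trans ?_
      simp only [List.cons_append]
      exact List.perm_middle.symm

theorem anc_get?_none (k : String) (hk : k ∉ ancKeys) : ancSpec.get? k = none := by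
  simp only [ancKeys, List.mem_cons, List.not_mem_nil, not_or, or_false] at hk
  obtain ⟨h1, h2, h3, h4, h5⟩ := hk
  simp [ancSpec, PySem.Dict.get?_mk_cons, PySem.Dict.get?,
    Ne.symm h1, Ne.symm h2, Ne.symm h3, Ne.symm h4, Ne.symm h5]

theorem con_get?_none (k : String) (hk : k ∉ conKeys) : conSpec.get? k = none := by
  simp only [conKeys, List.mem_cons, List.not_mem_nil, not_or, or_false] at hk
  obtain ⟨h1, h2, h3, h4⟩ := hk
  simp [conSpec, PySem.Dict.get?_mk_cons, PySem.Dict.get?,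
    Ne.symm h1, Ne.symm h2, Ne.symm h3, Ne.symm h4]

theorem hitOf_anc_key (kv : String × String) (h : hitOf ancSpec kv ≠ none) : kv.1 ∈ ancKeys := by
  by_contra hm
  exact h (by simp [hitOf, anc_get?_none kv.1 hm])

theorem hitOf_con_key (kv : String × String) (h : hitOf conSpec kv ≠ none) : kv.1 ∈ conKeys := by
  by_contra hm
  exact h (by simp [hitOf, con_get?_none kv.1 hm])

theorem sorted_anc (a : List (String × String)) :
    PySem.List.sorted ((dedupKeys a).filterMap (hitOf ancSpec)) (fun t => t.1) false = chainAnc a := by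
  apply PySem.List.sorted_eq_of_perm_of_pairwise_lt
  · have hperm := filterMap_perm_buckets ancKeys (by decide) (hitOf ancSpec) (dedupKeys a)
      (fun kv _ h => hitOf_anc_key kv h)
    have hflat : ((ancKeys.map (fun k => ((dedupKeys a).filter (fun kv => kv.1 = k)).filterMap (hitOf ancSpec))).flatten) = chainAnc a := by
      simp only [ancKeys, List.map_cons, List.map_nil, List.flatten_cons, List.flatten_nil]
      rw [bucket_eq ancSpec a "bond" 0 _ rfl,
        bucket_eq ancSpec a "ancestor_roles" 1 _ rfl,
        bucket_eq ancSpec a "consultant_roles" 2 _ rfl,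
        bucket_eq ancSpec a "expressions" 3 _ rfl,
        bucket_eq ancSpec a "traumas" 4 _ rfl]
      simp [chainAnc]
    exact hflat ▸ hperm.symm
  · unfold chainAnc
    split_ifs <;> simp [List.pairwise_cons]

theorem sorted_con (c : List (String × String)) :
    PySem.List.sorted ((dedupKeys c).filterMap (hitOf conSpec)) (fun t => t.1) false = chainCon c := by
  apply PySem.List.sorted_eq_of_perm_of_pairwise_lt
  · have hperm := filterMap_perm_buckets conKeys (by decide) (hitOf conSpec) (dedupKeys c)
      (fun kv _ h => hitOf_con_key kv h)
    have hflat : ((conKeys.map (fun k => ((dedupKeys c).filter (fun kv => kv.1 = k)).filterMap (hitOf conSpec))).flatten) = chainCon c := by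
      simp only [conKeys, List.map_cons, List.map_nil, List.flatten_cons, List.flatten_nil]
      rw [bucket_eq conSpec c "healing" 0 _ rfl,
        bucket_eq conSpec c "acts" 1 _ rfl,
        bucket_eq conSpec c "life" 2 _ rfl,
        bucket_eq conSpec c "relationship" 3 _ rfl]
      simp [chainCon]
    exact hflat ▸ hperm.symm
  · unfold chainCon
    split_ifs <;> simp [List.pairwise_cons]

theorem join_empty_nil : PySem.Str.join "" ([] : List String) = "" := by
  simp [PySem.Str.join, PySem.Chars.join_nil]

theorem join_empty_cons (x : String) (xs : List String) :
    PySem.Str.join "" (x :: xs) = x ++ PySem.Str.join "" xs := by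
  rw [← String.toList_inj]
  cases xs with
  | nil => simp [PySem.Str.join, PySem.Chars.join_singleton, PySem.Chars.join_nil]
  | cons y ys =>
    simp only [PySem.Str.join, List.map]
    rw [PySem.Chars.join_cons_cons]
    simp [String.toList_append]

theorem join_empty_append (xs ys : List String) :
    PySem.Str.join "" (xs ++ ys) = PySem.Str.join "" xs ++ PySem.Str.join "" ys := by
  induction xs with
  | nil => simp [join_empty_nil]
  | cons x xs ih => simp [join_empty_cons, ih, String.append_assoc]

theorem append_ne_empty_left (s t : String) (h : s ≠ "") : s ++ t ≠ "" := by
  intro he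
  apply h
  have h2 := congrArg String.toList he
  simp [String.toList_append] at h2
  rw [← String.toList_inj]
  simp [h2.1]

-- one row of B, with the two leading literals merged into A's literal
theorem rowStr_eq (esc : String → String) (r : Int) (v lbl pre : String)
    (h : "<tr><td class=\"k\">" ++ lbl ++ "</td><td>" = pre) :
    rowStr esc (r, lbl, v) = pre ++ esc v ++ "</td></tr>" := by
  simp only [rowStr]
  rw [h]

theorem map_rowStr_chainAnc (a : List (String × String)) :
    (chainAnc a).map (rowStr escPy) = rowsAncA a := by
  simp only [chainAnc, rowsAncA]
  split_ifs <;>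
    simp_all [rowStr_eq escPy 0 _ "Energía vincular" _ rfl,
      rowStr_eq escPy 1 _ "Roles ancestro" _ rfl,
      rowStr_eq escPy 2 _ "Roles consultante" _ rfl,
      rowStr_eq escPy 3 _ "Expresiones de la energía" _ rfl,
      rowStr_eq escPy 4 _ "Traumas familiares" _ rfl]

theorem map_rowStr_chainCon (c : List (String × String)) :
    (chainCon c).map (rowStr (fun v => v)) = rowsConA c := by
  simp only [chainCon, rowsConA]
  split_ifs <;>
    simp_all [rowStr_eq (fun v => v) 0 _ "Frases de sanación" _ rfl,
      rowStr_eq (fun v => v) 1 _ "Actos de conciliación" _ rfl,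
      rowStr_eq (fun v => v) 2 _ "Áreas de vida afectadas" _ rfl,
      rowStr_eq (fun v => v) 3 _ "Relación de sesión" _ rfl]

theorem rowStr_ne_empty (esc : String → String) (t : Int × String × String) :
    rowStr esc t ≠ "" := by
  unfold rowStr
  apply append_ne_empty_left
  apply append_ne_empty_left
  apply append_ne_empty_left
  intro h
  have := congrArg String.toList h
  simp at this

theorem join_map_rowStr_ne_empty (esc : String → String)
    (t : Int × String × String) (ts : List (Int × String × String)) :
    PySem.Str.join "" ((t :: ts).map (rowStr esc)) ≠ "" := by
  simp only [List.map, join_empty_cons]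
  exact append_ne_empty_left _ _ (rowStr_ne_empty esc t)

-- B's ancestor table equals A's (wrapped, or empty)
theorem tableB_anc (a : List (String × String)) :
    tableB a ancSpec escPy
      = if rowsAncA a ≠ [] then "<table class=\"meta-table\">" ++ PySem.Str.join "" (rowsAncA a) ++ "</table>" else "" := by
  simp only [tableB, sorted_anc]
  rw [← map_rowStr_chainAnc]
  cases hc : chainAnc a with
  | nil => simp [join_empty_nil]
  | cons t ts =>
    have hne := join_map_rowStr_ne_empty escPy t ts
    have hl : ((t :: ts).map (rowStr escPy)) ≠ [] := by simp
    rw [if_pos hne, if_pos hl]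

theorem tableB_con (c : List (String × String)) :
    tableB c conSpec (fun v => v)
      = if rowsConA c ≠ [] then "<table class=\"meta-table\">" ++ PySem.Str.join "" (rowsConA c) ++ "</table>" else "" := by
  simp only [tableB, sorted_con]
  rw [← map_rowStr_chainCon]
  cases hc : chainCon c with
  | nil => simp [join_empty_nil]
  | cons t ts =>
    have hne := join_map_rowStr_ne_empty (fun v => v) t ts
    have hl : ((t :: ts).map (rowStr (fun v => v))) ≠ [] := by simp
    rw [if_pos hne, if_pos hl]

theorem div_h3_append (X : String) :
    "<div class=\"topic-card\">" ++ ("<h3>" ++ X) = "<div class=\"topic-card\"><h3>" ++ X := by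
  have hlit : ("<div class=\"topic-card\">" : String) ++ "<h3>" = "<div class=\"topic-card\"><h3>" := by decide
  rw [← String.append_assoc, hlit]

theorem str_append_empty (s : String) : s ++ "" = s := by
  rw [← String.toList_inj]; simp [String.toList_append]

-- per-ancestor: A's loop body appends exactly B's card
theorem ancBodyA_join (parts : List String) (a : List (String × String)) :
    PySem.Str.join "" (ancBodyA parts a) = PySem.Str.join "" parts ++ cardB a := by
  simp only [ancBodyA, cardB, tableB_anc]
  by_cases hr : rowsAncA a ≠ [] <;>
    [skip; rw [not_not] at hr] <;>
    simp [hr, join_empty_append, join_empty_cons, join_empty_nil] <;>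
    split_ifs <;> simp [String.append_assoc, div_h3_append, str_append_empty]

theorem foldl_cards (l : List (List (String × String))) (parts : List String) (s : String)
    (hs : PySem.Str.join "" parts = s) :
    PySem.Str.join "" (l.foldl ancBodyA parts) = l.foldl (fun out a => out ++ cardB a) s := by
  induction l generalizing parts s with
  | nil => simpa using hs
  | cons a l ih =>
    simp only [List.foldl]
    exact ih (ancBodyA parts a) (s ++ cardB a) (by rw [ancBodyA_join, hs])

theorem conBodyA_join (parts : List String) (c : List (String × String)) :
    PySem.Str.join "" (conBodyA parts c)
      = PySem.Str.join "" parts ++ ("<h3>Conciliación</h3>" ++ tableB c conSpec (fun v => v)) := by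
  simp only [conBodyA, tableB_con]
  by_cases hr : rowsConA c ≠ [] <;>
    [skip; rw [not_not] at hr] <;>
    simp [hr, join_empty_append, join_empty_cons, join_empty_nil, String.append_assoc]

-- ===== VERDICT (by name: the statement is the Claim_ definition above) =====
theorem section_ancestors_py_spec : Claim_equal_section_ancestors_py := by
  intro ancestors conciliation _
  unfold Spec_section_ancestors_py section_ancestors_py section_ancestors_py_alt
  by_cases hg : (ancestors.isEmpty && pyNotOpt conciliation) = true
  · simp [hg]
  · have hjoin : PySem.Str.join "" ["<h2>Ancestros sistémicos</h2>"] = "<h2>Ancestros sistémicos</h2>" := by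
      rw [join_empty_cons, join_empty_nil, str_append_empty]
    cases conciliation with
    | none =>
      simp only [hg, if_neg, Bool.not_eq_true]
      simp [foldl_cards ancestors _ _ hjoin]
    | some c =>
      by_cases hc : c.isEmpty
      · simp [hg, hc, foldl_cards ancestors _ _ hjoin]
      · simp [hg, hc, conBodyA_join, foldl_cards ancestors _ _ hjoin, String.append_assoc]
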